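-- pv_equiv track=rewrite | github.com/mindedal/advent-of-code | 2025/10/main.py | _diagram_to_mask
-- ===== SOURCE A (Python) =====
-- def _diagram_to_mask(diagram: str) -> int:
--     mask = 0
--     for i, ch in enumerate(diagram):
--         if ch == "#":
--             mask |= 1 << i
--         elif ch != ".":
--             raise ValueError(f"Unexpected indicator character: {ch!r}")
--     return mask
-- ===== SOURCE B (Python) =====
-- def _diagram_to_mask(diagram: str) -> int:
--     for ch in diagram:
--         if ch != "#" and ch != ".":
--             raise ValueError(f"Unexpected indicator character: {ch!r}")
--     if not diagram:
--         return 0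
--     return int(diagram.translate(str.maketrans("#.", "10"))[::-1], 2)
-- ===== Notes on version B (the rewrite author's own statement) =====
-- stated objective: idiomatic
-- what changed: Replaces the bit-by-bit or-loop with a whole-string transform: validate in one ordered scan, then translate '#'/'.' to '1'/'0', reverse, and parse the result as a base-2 integer.
import Mathlib
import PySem

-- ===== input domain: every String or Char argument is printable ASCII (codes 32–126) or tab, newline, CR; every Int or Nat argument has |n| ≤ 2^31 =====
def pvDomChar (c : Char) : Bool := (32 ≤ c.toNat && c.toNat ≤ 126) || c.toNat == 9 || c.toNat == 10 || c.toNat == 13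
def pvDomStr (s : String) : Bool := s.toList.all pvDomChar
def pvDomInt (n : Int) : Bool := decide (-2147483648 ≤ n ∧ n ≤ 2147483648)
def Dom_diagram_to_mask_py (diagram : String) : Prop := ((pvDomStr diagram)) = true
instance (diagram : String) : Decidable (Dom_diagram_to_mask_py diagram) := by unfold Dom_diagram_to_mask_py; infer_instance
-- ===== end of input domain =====

-- B replaces A's bit-by-bit or-loop with a string transform: translate '#'/'.' to '1'/'0',
-- reverse, and parse as a base-2 integer (objective: idiomatic; same cost).

-- ===== PORT A =====
-- for i, ch in enumerate(diagram): if ch == '#': mask |= 1 << i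
-- (the elif branch raises ValueError; those inputs are excluded by Pre_)
def diagram_to_mask_py (diagram : String) : Int :=
  (PySem.List.enumerate diagram.toList).foldl
    (fun mask p => if p.2 = '#' then PySem.Int.bor mask ((1 : Int) <<< p.1.toNat) else mask) 0

-- ===== PORT B =====
-- diagram.translate(maketrans("#.", "10"))[::-1] then int(_, 2); int(s, 2) is ported by
-- hand as the base-2 left-to-right Horner evaluation (exact here: s holds only '0'/'1').
def diagram_to_mask_py_alt (diagram : String) : Int :=
  let bits := diagram.toList.map (fun c => if c = '#' then '1' else '0')
  if bits = [] then 0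
  else bits.reverse.foldl (fun acc c => 2 * acc + (if c = '1' then 1 else 0)) 0

-- ===== PRECONDITION & SPEC =====
-- Pre_ excludes exactly the inputs containing a character other than '#'/'.',
-- on which the Python A raises ValueError (B raises the same ValueError).
def Pre_diagram_to_mask_py (diagram : String) : Prop :=
  (diagram.toList.all (fun c => c == '#' || c == '.')) = true
instance (diagram : String) : Decidable (Pre_diagram_to_mask_py diagram) := by
  unfold Pre_diagram_to_mask_py; infer_instance
def pvWitness_diagram_to_mask_py : String := "#."

def Spec_diagram_to_mask_py (diagram : String) (out : Int) : Prop := out = diagram_to_mask_py_alt diagram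
instance (diagram : String) (out : Int) : Decidable (Spec_diagram_to_mask_py diagram out) := by unfold Spec_diagram_to_mask_py; infer_instance

-- ===== CLAIM (what is proved, stated in full; the proofs are below) =====
def Claim_equal_diagram_to_mask_py : Prop := ∀ (diagram : String), Dom_diagram_to_mask_py diagram → Pre_diagram_to_mask_py diagram → Spec_diagram_to_mask_py diagram (diagram_to_mask_py diagram)

-- ===== LEMMAS AND PROOFS =====

-- the common value: bit i set iff character i is '#'
def pvVal : List Char → Nat
  | [] => 0
  | c :: t => (if c = '#' then 1 else 0) + 2 * pvVal t

theorem pv_lor_pow (m k : Nat) (h : m < 2 ^ k) : m ||| 2 ^ k = m + 2 ^ k := by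
  have h2 := Nat.two_pow_add_eq_or_of_lt h 1
  simp only [mul_one] at h2
  rw [Nat.lor_comm]
  omega

theorem pv_afold (l : List Char) (k m : Nat) (hm : m < 2 ^ k)
    (hl : ∀ c ∈ l, c = '#' ∨ c = '.') :
    (PySem.List.enumerate l (k : Int)).foldl
      (fun mask p => if p.2 = '#' then PySem.Int.bor mask ((1 : Int) <<< p.1.toNat) else mask)
      (m : Int) = (m : Int) + 2 ^ k * (pvVal l : Int) := by
  induction l generalizing k m with
  | nil => simp [PySem.List.enumerate_nil, pvVal]
  | cons c t ih =>
    have hc := hl c (by simp)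
    have ht : ∀ c ∈ t, c = '#' ∨ c = '.' := fun c hcm => hl c (by simp [hcm])
    have hk1 : (k : Int) + 1 = ((k + 1 : Nat) : Int) := by push_cast; ring
    have hpow : (2:Nat) ^ (k+1) = 2 ^ k + 2 ^ k := by ring
    rcases hc with hc | hc <;> subst hc <;>
      rw [PySem.List.enumerate_cons, List.foldl_cons, hk1]
    · show List.foldl _ (PySem.Int.bor ((m : Nat) : Int) ((1 : Int) <<< ((((k : Int)).toNat : Nat) : Int))) _ = _
      have hb : PySem.Int.bor ((m : Nat) : Int) ((1 : Int) <<< ((((k : Int)).toNat : Nat) : Int))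
          = ((m + 2 ^ k : Nat) : Int) := by
        rw [Int.toNat_natCast k]
        have h2 : (1 : Int) <<< ((k : Nat) : Int) = ((2 ^ k : Nat) : Int) := by
          rw [Int.shiftLeft_natCast_right, Int.shiftLeft_eq]
          push_cast
          ring
        rw [h2, PySem.Int.bor_natCast, pv_lor_pow m k hm]
      rw [hb, ih (k + 1) (m + 2 ^ k) (by omega) ht]
      simp only [pvVal]
      push_cast
      ring
    · show List.foldl _ ((m : Nat) : Int) _ = _
      rw [ih (k + 1) m (by omega) ht]
      simp only [pvVal, if_neg (by decide : ¬('.':Char) = '#')]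
      push_cast
      ring

theorem pv_bfold (l : List Char) (acc : Int) :
    (l.map (fun c => if c = '#' then '1' else '0')).reverse.foldl
      (fun acc c => 2 * acc + (if c = '1' then 1 else 0)) acc
    = acc * 2 ^ l.length + (pvVal l : Int) := by
  rw [← List.map_reverse, List.foldl_map]
  induction l generalizing acc with
  | nil => simp [pvVal]
  | cons c t ih =>
    rw [List.reverse_cons, List.foldl_append]
    simp only [List.foldl_cons, List.foldl_nil]
    rw [ih acc]
    by_cases hc : c = '#' <;> simp [hc, pvVal, List.length_cons] <;> (try push_cast) <;> ring

-- ===== VERDICT (by name: the statement is the Claim_ definition above) =====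
theorem diagram_to_mask_py_spec : Claim_equal_diagram_to_mask_py := by
  intro diagram _ hpre
  have hpre' : ∀ c ∈ diagram.toList, c = '#' ∨ c = '.' := by
    intro c hc
    have h := List.all_eq_true.mp hpre c hc
    simpa using h
  unfold Spec_diagram_to_mask_py diagram_to_mask_py diagram_to_mask_py_alt
  have ha := pv_afold diagram.toList 0 0 (by norm_num) hpre'
  simp only [Nat.cast_zero, pow_zero, one_mul, zero_add] at ha
  rw [ha]
  by_cases hnil : diagram.toList = []
  · simp [hnil, pvVal]
  · have hne : diagram.toList.map (fun c => if c = '#' then '1' else '0') ≠ [] := by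
      simpa using hnil
    rw [if_neg hne, pv_bfold diagram.toList 0]
    ring
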